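-- pv_equiv track=rewrite | github.com/sourcery-ai-experiments/jaar | src/calendar/road.py | get_ancestor_roads
-- ===== SOURCE A (Python) =====
-- class Road(str):
--     pass
--
-- def get_ancestor_roads(road: Road):
--     if road is None:
--         return []
--     nodes = road.split(",")
--     temp_road = nodes.pop(0)
--
--     temp_roads = [temp_road]
--     if nodes != []:
--         while nodes != []:
--             temp_road = f"{temp_road},{nodes.pop(0)}"
--             temp_roads.append(temp_road)
--
--     x_roads = []
--     while temp_roads != []:
--         x_roads.append(temp_roads.pop(len(temp_roads) - 1))
--     return x_roads
-- ===== SOURCE B (Python) =====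
-- def get_ancestor_roads(road):
--     if road is None:
--         return []
--     nodes = road.split(",")
--     return [",".join(nodes[:i]) for i in range(len(nodes), 0, -1)]
-- ===== Notes on version B (the rewrite author's own statement) =====
-- stated objective: simpler
-- what changed: Replaces A's incremental f-string accumulation loop plus an explicit pop-from-the-end reversal loop with a single descending-range comprehension that joins prefix slices of the split nodes.
import Mathlib
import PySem

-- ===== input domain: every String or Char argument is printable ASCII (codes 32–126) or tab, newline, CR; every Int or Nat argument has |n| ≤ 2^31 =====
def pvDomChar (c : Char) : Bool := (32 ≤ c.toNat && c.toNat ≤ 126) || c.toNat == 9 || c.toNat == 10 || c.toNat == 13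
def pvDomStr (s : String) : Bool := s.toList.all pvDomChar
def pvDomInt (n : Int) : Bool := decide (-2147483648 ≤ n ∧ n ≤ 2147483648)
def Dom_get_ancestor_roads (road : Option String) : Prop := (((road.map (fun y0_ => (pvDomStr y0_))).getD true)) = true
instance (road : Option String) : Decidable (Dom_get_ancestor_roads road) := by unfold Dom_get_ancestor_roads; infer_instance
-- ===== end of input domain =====

-- B replaces A's incremental accumulation loop plus pop-from-the-end reversal loop with one
-- descending-range comprehension joining prefix slices; same values, simpler decomposition.

-- ===== PORT A =====
-- A ported over List Char (PySem.Chars); strings rebuilt with String.mk at the end.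

-- one iteration of:  temp_road = f"{temp_road},{nodes.pop(0)}"; temp_roads.append(temp_road)
def pvAStep (st : List Char × List (List Char)) (node : List Char) : List Char × List (List Char) :=
  (st.1 ++ [','] ++ node, st.2 ++ [st.1 ++ [','] ++ node])

-- while temp_roads != []: x_roads.append(temp_roads.pop(len(temp_roads) - 1))
def pvXLoop (ts acc : List (List Char)) : List (List Char) :=
  if h : ts = [] then acc
  else pvXLoop ts.dropLast (acc ++ [ts.getLast h])
termination_by ts.length
decreasing_by
  simp only [List.length_dropLast]
  have := List.length_pos_iff.mpr h
  omega

def get_ancestor_roads (road : Option String) : List String :=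
  match road with
  | none => []
  | some r =>
    match PySem.Chars.splitOn r.toList [','] with
    | [] => []  -- unreachable guard: split always returns a nonempty list (for nodes.pop(0))
    | n0 :: rest =>
      let st := rest.foldl pvAStep (n0, [n0])
      (pvXLoop st.2 []).map String.mk

-- ===== PORT B =====
def get_ancestor_roads_alt (road : Option String) : List String :=
  match road with
  | none => []
  | some r =>
    let nodes := PySem.Chars.splitOn r.toList [',']
    (PySem.List.pyRange (nodes.length : Int) 0 (-1)).map
      (fun i => String.mk (PySem.Chars.join [','] (PySem.List.slice nodes none (some i))))

-- ===== PRECONDITION & SPEC =====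
def Spec_get_ancestor_roads (road : Option String) (out : List String) : Prop := out = get_ancestor_roads_alt road
instance (road : Option String) (out : List String) : Decidable (Spec_get_ancestor_roads road out) := by unfold Spec_get_ancestor_roads; infer_instance

-- ===== CLAIM (what is proved, stated in full; the proofs are below) =====
def Claim_equal_get_ancestor_roads : Prop := ∀ (road : Option String), Dom_get_ancestor_roads road → Spec_get_ancestor_roads road (get_ancestor_roads road)

-- ===== LEMMAS AND PROOFS =====

-- the list of successive comma-extensions of s by the elements of l
def pvPref (s : List Char) : List (List Char) → List (List Char)
  | [] => []
  | y :: ys => (s ++ [','] ++ y) :: pvPref (s ++ [','] ++ y) ys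

theorem pvXLoop_eq (ts : List (List Char)) : ∀ acc, pvXLoop ts acc = acc ++ ts.reverse := by
  induction ts using List.reverseRecOn with
  | nil => intro acc; simp [pvXLoop]
  | append_singleton l a ih =>
    intro acc
    rw [pvXLoop]
    simp only [List.append_ne_nil_of_right_ne_nil _ (by simp : ([a] : List (List Char)) ≠ []),
      dite_false, List.dropLast_concat, List.getLast_append_singleton]
    rw [ih]
    simp

theorem pvFoldl_snd (l : List (List Char)) : ∀ s acc,
    (l.foldl pvAStep (s, acc)).2 = acc ++ pvPref s l := by
  induction l with
  | nil => intro s acc; simp [pvPref]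
  | cons y ys ih =>
    intro s acc
    simp only [List.foldl_cons, pvAStep, pvPref]
    rw [ih]
    simp

theorem pvJoin_concat (pre : List (List Char)) (y : List Char) (h : pre ≠ []) :
    PySem.Chars.join [','] (pre ++ [y]) = PySem.Chars.join [','] pre ++ [','] ++ y := by
  induction pre with
  | nil => exact absurd rfl h
  | cons a l ih =>
    cases l with
    | nil => simp [PySem.Chars.join_cons_cons, PySem.Chars.join_singleton]
    | cons b m =>
      have := ih (by simp)
      simp only [List.cons_append, PySem.Chars.join_cons_cons] at *
      rw [this]
      simp

theorem pvPref_join (l : List (List Char)) : ∀ (pre : List (List Char)), pre ≠ [] →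
    pvPref (PySem.Chars.join [','] pre) l =
      (List.range l.length).map (fun k => PySem.Chars.join [','] (pre ++ l.take (k + 1))) := by
  induction l with
  | nil => intro pre _; simp [pvPref]
  | cons y ys ih =>
    intro pre hpre
    simp only [pvPref, List.length_cons, List.range_succ_eq_map, List.map_cons, List.map_map]
    congr 1
    · rw [← pvJoin_concat pre y hpre]; simp
    · rw [← pvJoin_concat pre y hpre, ih (pre ++ [y]) (by simp)]
      apply List.map_congr_left
      intro k _
      simp

theorem pvRange_down_map {α : Type} (n : Nat) (f : Int → α) :
    (PySem.List.pyRange (n : Int) 0 (-1)).map f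
      = ((List.range n).map (fun k => f ((k + 1 : Nat) : Int))).reverse := by
  rw [PySem.List.pyRange_neg_one_eq_reverse, List.map_reverse]
  congr 1
  rw [PySem.List.pyRange_one]
  have hn : (((n : Int) + 1) - (0 + 1)).toNat = n := by omega
  rw [hn, List.map_map]
  apply List.map_congr_left
  intro k _
  simp only [Function.comp]
  congr 1
  push_cast
  ring

-- ===== VERDICT (by name: the statement is the Claim_ definition above) =====
theorem get_ancestor_roads_spec : Claim_equal_get_ancestor_roads := by
  intro road _
  unfold Spec_get_ancestor_roads get_ancestor_roads get_ancestor_roads_alt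
  cases road with
  | none => rfl
  | some r =>
    simp only
    cases hs : PySem.Chars.splitOn r.toList [','] with
    | nil => simp
    | cons n0 rest =>
      dsimp only
      rw [pvFoldl_snd, pvXLoop_eq, List.nil_append, List.length_cons,
        show ((rest.length + 1 : Nat) : Int) = ((rest.length + 1 : Nat) : Int) from rfl,
        pvRange_down_map]
      rw [← List.map_reverse, List.map_reverse, List.map_reverse, List.reverse_inj]
      have hL : (n0 :: pvPref n0 rest)
          = (List.range (rest.length + 1)).map (fun k => PySem.Chars.join [','] ((n0 :: rest).take (k + 1))) := by
        rw [List.range_succ_eq_map, List.map_cons, List.map_map]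
        congr 1
        · simp [PySem.Chars.join_singleton]
        · have h := pvPref_join rest [n0] (by simp)
          rw [PySem.Chars.join_singleton] at h
          rw [h]
          apply List.map_congr_left
          intro k _
          simp [List.take_succ_cons]
      calc List.map String.mk ([n0] ++ pvPref n0 rest)
          = List.map String.mk ((List.range (rest.length + 1)).map
              (fun k => PySem.Chars.join [','] ((n0 :: rest).take (k + 1)))) := by
            rw [← hL]; rfl
        _ = _ := by
            rw [List.map_map]
            apply List.map_congr_left
            intro k _
            simp only [Function.comp]
            rw [PySem.List.slice_to_natCast]
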